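-- pv_equiv track=rewrite | github.com/azya52/MK90 | videoplayer/video2mk.py | get_mac
-- ===== SOURCE A (Python) =====
-- def get_mac(data, name):
--     i = 0
--     outfile = "\nframe" + name + ":"
--     while i < len(data):
--         if i % 20 == 0:
--             outfile += "\n    .byte "
--         outfile += str(data[i]) + ", "
--         i += 1
--     outfile += "\n"
--     return outfile
-- ===== SOURCE B (Python) =====
-- def get_mac(data, name):
--     lines = []
--     for i in range(0, len(data), 20):
--         chunk = data[i:i + 20]
--         lines.append("\n    .byte " + "".join(str(x) + ", " for x in chunk))
--     return "\nframe" + name + ":" + "".join(lines) + "\n"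
-- ===== Notes on version B (the rewrite author's own statement) =====
-- stated objective: faster
-- what changed: A's flat while-loop with a per-element index, an i%20 modulo test and repeated string += is replaced by slice-based grouping: one pass over chunk start offsets (range(0, len(data), 20)), each 20-element slice rendered as one '.byte' line, and the lines joined once at the end.
import Mathlib
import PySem

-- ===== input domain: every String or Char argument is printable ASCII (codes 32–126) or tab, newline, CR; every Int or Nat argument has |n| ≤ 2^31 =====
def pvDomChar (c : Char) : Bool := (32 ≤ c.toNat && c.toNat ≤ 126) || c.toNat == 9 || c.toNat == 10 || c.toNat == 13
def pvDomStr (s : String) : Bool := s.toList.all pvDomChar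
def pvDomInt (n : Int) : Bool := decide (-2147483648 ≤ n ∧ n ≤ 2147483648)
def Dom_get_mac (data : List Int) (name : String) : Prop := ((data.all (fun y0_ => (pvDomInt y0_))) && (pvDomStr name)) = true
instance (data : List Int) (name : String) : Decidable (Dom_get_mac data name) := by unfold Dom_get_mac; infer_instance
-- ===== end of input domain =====

-- B replaces A's flat index/modulo while-loop with repeated string += by slice-based grouping into 20-byte chunks joined once at the end (measured faster: it avoids quadratic string concatenation).

-- ===== PORT A =====
-- the while loop of A, state = (i, outfile); data[i] is safe under the guard i < len(data)
def getMacLoopA (data : List Int) (i : Nat) (outfile : String) : String :=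
  if h : i < data.length then
    let outfile := if i % 20 == 0 then outfile ++ "\n    .byte " else outfile
    getMacLoopA data (i + 1) (outfile ++ PySem.Int.toStr data[i] ++ ", ")
  else outfile
termination_by data.length - i

def get_mac (data : List Int) (name : String) : String :=
  getMacLoopA data 0 ("\nframe" ++ name ++ ":") ++ "\n"

-- ===== PORT B =====
-- "\n    .byte " + "".join(str(x) + ", " for x in chunk)
def getMacLineB (chunk : List Int) : String :=
  "\n    .byte " ++ PySem.Str.join "" (chunk.map (fun x => PySem.Int.toStr x ++ ", "))

def get_mac_alt (data : List Int) (name : String) : String :=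
  "\nframe" ++ name ++ ":" ++
    PySem.Str.join "" ((PySem.List.pyRange 0 (data.length : Int) 20).foldl
      (fun acc i => acc ++ [getMacLineB (PySem.List.slice data (some i) (some (i + 20)))]) []) ++
    "\n"

-- ===== PRECONDITION & SPEC =====
def Spec_get_mac (data : List Int) (name : String) (out : String) : Prop := out = get_mac_alt data name
instance (data : List Int) (name : String) (out : String) : Decidable (Spec_get_mac data name out) := by unfold Spec_get_mac; infer_instance

-- ===== CLAIM (what is proved, stated in full; the proofs are below) =====
def Claim_equal_get_mac : Prop := ∀ (data : List Int) (name : String), Dom_get_mac data name → Spec_get_mac data name (get_mac data name)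

-- ===== LEMMAS AND PROOFS =====

theorem join_empty_nil : PySem.Str.join "" ([] : List String) = "" := rfl

theorem join_empty_cons (a : String) (l : List String) :
    PySem.Str.join "" (a :: l) = a ++ PySem.Str.join "" l := by
  cases l with
  | nil =>
    simp only [PySem.Str.join, List.map, PySem.Chars.join, List.intercalate, List.intersperse,
      List.flatten]
    simp [String.ofList_toList]
  | cons b t => simp [PySem.Str.join, PySem.Chars.join, List.intercalate, String.ofList_append]

-- canonical chunked rendering: one line per 20-element chunk
def chunksS (l : List Int) : String :=
  if l = [] then "" else getMacLineB (l.take 20) ++ chunksS (l.drop 20)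
termination_by l.length
decreasing_by
  rename_i h
  have : 0 < l.length := List.length_pos_iff.mpr h
  simp [List.length_drop]; omega

theorem chunksS_nil : chunksS [] = "" := by unfold chunksS; simp

theorem chunksS_ne (l : List Int) (h : l ≠ []) :
    chunksS l = getMacLineB (l.take 20) ++ chunksS (l.drop 20) := by
  conv_lhs => unfold chunksS
  rw [if_neg h]

theorem loopA_stop (data : List Int) (i : Nat) (acc : String) (h : data.length ≤ i) :
    getMacLoopA data i acc = acc := by
  unfold getMacLoopA; simp [Nat.not_lt.mpr h]

theorem loopA_acc (data : List Int) (i : Nat) (acc : String) :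
    getMacLoopA data i acc = acc ++ getMacLoopA data i "" := by
  by_cases h : i < data.length
  · rw [getMacLoopA, getMacLoopA]
    simp only [h, dif_pos]
    rw [loopA_acc data (i+1)]
    conv_rhs => rw [loopA_acc data (i+1)]
    split_ifs <;> simp [String.append_assoc, String.empty_append]
  · rw [loopA_stop data i acc (Nat.not_lt.mp h), loopA_stop data i "" (Nat.not_lt.mp h)]
    exact (String.append_empty (s := acc)).symm
termination_by data.length - i
decreasing_by all_goals omega

-- processing the tail of a line: m elements remain before the next multiple of 20
theorem loopA_tail (data : List Int) (m : Nat) (hm : m < 20) :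
    ∀ (i : Nat) (acc : String), i % 20 = 20 - m →
    getMacLoopA data i acc =
      acc ++ PySem.Str.join "" (((data.drop i).take m).map (fun x => PySem.Int.toStr x ++ ", "))
          ++ getMacLoopA data (i + m) "" := by
  induction m with
  | zero => intro i acc h; omega
  | succ m ih =>
    intro i acc h
    by_cases hl : i < data.length
    · rw [getMacLoopA]
      simp only [hl, dif_pos]
      have h20 : ¬ (i % 20 == 0) := by simp; omega
      simp only [h20, if_neg, Bool.false_eq_true, not_false_eq_true, if_neg]
      have hdrop : data.drop i = data[i] :: data.drop (i + 1) :=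
        List.drop_eq_getElem_cons hl
      rw [hdrop]
      simp only [List.take_succ_cons, List.map_cons, join_empty_cons]
      by_cases hm0 : m = 0
      · subst hm0
        rw [loopA_acc data (i+1)]
        simp [join_empty_nil, String.append_assoc, String.append_empty]
      · have h1 : (i + 1) % 20 = 20 - m := by omega
        rw [ih (by omega) (i+1) _ h1]
        have : i + 1 + m = i + (m + 1) := by omega
        rw [this]
        simp [String.append_assoc]
    · have hge : data.length ≤ i := Nat.not_lt.mp hl
      rw [loopA_stop data i acc hge, loopA_stop data (i + (m+1)) "" (by omega)]
      rw [List.drop_eq_nil_of_le hge]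
      simp [join_empty_nil, String.append_empty]

theorem loopA_chunks (data : List Int) : ∀ (i : Nat), i % 20 = 0 →
    getMacLoopA data i "" = chunksS (data.drop i) := by
  intro i h20
  by_cases hl : i < data.length
  · rw [getMacLoopA]
    simp only [hl, dif_pos, h20]
    have h1 : (i + 1) % 20 = 20 - 19 := by omega
    rw [loopA_tail data 19 (by omega) (i+1) _ h1]
    have hdrop : data.drop i = data[i] :: data.drop (i + 1) :=
      List.drop_eq_getElem_cons hl
    have hne : data.drop i ≠ [] := by
      intro hc
      have := List.drop_eq_nil_iff.mp hc
      omega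
    rw [chunksS_ne _ hne]
    have htake : (data.drop i).take 20 = data[i] :: (data.drop (i+1)).take 19 := by
      rw [hdrop, show (20:Nat) = 19+1 from rfl, List.take_succ_cons]
    have hdd : (data.drop i).drop 20 = data.drop (i + 20) := by
      rw [List.drop_drop, Nat.add_comm]
    rw [htake, hdd]
    have hrec : getMacLoopA data (i + 1 + 19) "" = chunksS (data.drop (i + 20)) := by
      have : i + 1 + 19 = i + 20 := by omega
      rw [this]; exact loopA_chunks data (i + 20) (by omega)
    rw [hrec]
    unfold getMacLineB
    simp [join_empty_cons, String.append_assoc, String.empty_append]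
  · rw [loopA_stop data i "" (Nat.not_lt.mp hl),
        List.drop_eq_nil_of_le (Nat.not_lt.mp hl), chunksS_nil]
termination_by i _ => data.length - i
decreasing_by omega

theorem pyRange20_nil (a b : Int) (h : b ≤ a) : PySem.List.pyRange a b 20 = [] := by
  rw [PySem.List.pyRange_of_pos a b (by omega)]
  simp [Int.not_lt.mpr h]

theorem pyRange20_cons (a b : Int) (h : a < b) :
    PySem.List.pyRange a b 20 = a :: PySem.List.pyRange (a + 20) b 20 := by
  rw [PySem.List.pyRange_of_pos a b (by omega), PySem.List.pyRange_of_pos (a+20) b (by omega)]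
  have hc : ((b - a + 20 - 1) / 20).toNat =
      (if a + 20 < b then ((b - (a + 20) + 20 - 1) / 20).toNat else 0) + 1 := by
    split_ifs with h2 <;> omega
  rw [if_pos h, hc, List.range_succ_eq_map]
  simp only [List.map_cons, List.map_map]
  congr 1
  · norm_num
  · apply List.map_congr_left
    intro k _
    simp only [Function.comp_apply]
    push_cast
    ring

theorem foldl_snoc {α : Type} (g : α → String) (l : List α) (acc : List String) :
    l.foldl (fun acc i => acc ++ [g i]) acc = acc ++ l.map g := by
  induction l generalizing acc with
  | nil => simp
  | cons a t ih => simp [ih, List.append_assoc]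

theorem joinB_chunks (data : List Int) : ∀ (k : Nat),
    PySem.Str.join "" ((PySem.List.pyRange (k : Int) (data.length : Int) 20).map
      (fun i => getMacLineB (PySem.List.slice data (some i) (some (i + 20))))) =
    chunksS (data.drop k) := by
  intro k
  by_cases hl : k < data.length
  · rw [pyRange20_cons _ _ (by exact_mod_cast hl)]
    simp only [List.map_cons, join_empty_cons]
    have hslice : PySem.List.slice data (some (k : Int)) (some ((k : Int) + 20)) =
        (data.drop k).take 20 := by
      have : ((k : Int) + 20) = ((k : Int) + ((20 : Nat) : Int)) := by norm_num
      rw [this, PySem.List.slice_natCast_add]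
    have hcast : (k : Int) + 20 = ((k + 20 : Nat) : Int) := by push_cast; ring
    rw [hslice, hcast, joinB_chunks data (k + 20)]
    have hne : data.drop k ≠ [] := by
      intro hc; have := List.drop_eq_nil_iff.mp hc; omega
    rw [chunksS_ne _ hne, List.drop_drop]
  · rw [pyRange20_nil _ _ (by exact_mod_cast Nat.not_lt.mp hl)]
    rw [List.drop_eq_nil_of_le (Nat.not_lt.mp hl), chunksS_nil]
    simp [join_empty_nil]
termination_by k => data.length - k
decreasing_by omega

-- ===== VERDICT (by name: the statement is the Claim_ definition above) =====
theorem get_mac_spec : Claim_equal_get_mac := by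
  intro data name _
  unfold Spec_get_mac get_mac get_mac_alt
  rw [loopA_acc data 0, loopA_chunks data 0 (by omega)]
  have h0 := joinB_chunks data 0
  simp only [Nat.cast_zero, List.drop_zero] at h0
  rw [foldl_snoc, List.nil_append, h0, List.drop_zero]
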